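-- pv_equiv track=rewrite | github.com/bagavi/Tse-Dude | CommonFunctions.py | groupContexts
-- ===== SOURCE A (Python) =====
-- def groupContexts( Dictionary, Alphabet ):
--     GroupDict = dict()
--     for context in Dictionary:
--         value = Dictionary[context]
--         ConLen = len(context)
--         GroupContext = list( context[: int( (ConLen-1)/2)] ) + [ '*' ] + list( context[ int( (ConLen+1)/2) :] )
--         GroupDict[ tuple( GroupContext ) ] = GroupDict.get( tuple( GroupContext ), [] ) + [value]
--     return(GroupDict)
-- ===== SOURCE B (Python) =====
-- def groupContexts(Dictionary, Alphabet):
--     def mask(context):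
--         L = len(context)
--         return tuple(context[: (L - 1) // 2]) + ('*',) + tuple(context[(L + 1) // 2:])
--     pairs = [(mask(context), value) for context, value in Dictionary.items()]
--     keys = dict.fromkeys(m for m, _ in pairs)
--     return {m: [v for m2, v in pairs if m2 == m] for m in keys}
-- ===== Notes on version B (the rewrite author's own statement) =====
-- stated objective: alternative
-- what changed: Replaces A's incremental dict accumulation (repeated get-and-append per entry) with a gather-by-key pass: mask all keys once into a flat pair list, dedup the masked keys in first-occurrence order, then collect each group's values with one comprehension per distinct key.
import Mathlib
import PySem

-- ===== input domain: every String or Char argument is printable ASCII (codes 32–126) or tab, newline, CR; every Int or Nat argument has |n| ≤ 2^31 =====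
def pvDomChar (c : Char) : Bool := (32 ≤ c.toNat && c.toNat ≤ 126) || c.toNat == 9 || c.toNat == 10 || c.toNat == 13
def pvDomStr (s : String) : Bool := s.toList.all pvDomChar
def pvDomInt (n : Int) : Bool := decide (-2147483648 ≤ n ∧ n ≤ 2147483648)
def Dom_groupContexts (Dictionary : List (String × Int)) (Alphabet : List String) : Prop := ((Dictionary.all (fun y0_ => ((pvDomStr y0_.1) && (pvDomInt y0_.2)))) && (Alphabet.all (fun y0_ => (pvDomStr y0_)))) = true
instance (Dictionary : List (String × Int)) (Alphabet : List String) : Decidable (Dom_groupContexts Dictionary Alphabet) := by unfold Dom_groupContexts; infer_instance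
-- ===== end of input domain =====

-- B groups by gathering: mask all keys once, dedup the masked keys, then collect each group's
-- values with one gather per distinct key — instead of A's incremental dict accumulation (objective: alternative).


-- ===== PORT A =====
-- Python's int((L-1)/2) / int((L+1)/2) truncate toward zero; for L = len(context) ≥ 0 both are
-- the Nat values (L-1)/2 and (L+1)/2 (Nat subtraction gives 0 at L = 0, matching int(-0.5) = 0),
-- so the nonnegative string slices are exactly List.take / List.drop on the char list.
def groupContexts (Dictionary : List (String × Int)) (Alphabet : List String) : List (List String × List Int) :=
  (Dictionary.foldl
    (fun (groupDict : PySem.Dict (List String) (List Int)) kv =>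
      let context := kv.1
      let value := kv.2
      let cs := context.toList.map (fun c => c.toString)
      let conLen := cs.length
      let groupContext := cs.take ((conLen - 1) / 2) ++ ["*"] ++ cs.drop ((conLen + 1) / 2)
      groupDict.insert groupContext (groupDict.getD groupContext [] ++ [value]))
    PySem.Dict.empty).items

-- ===== PORT B =====
-- B's (L-1)//2 is -1 only at L = 0, where context[:-1] on the empty string is empty = take 0:
-- take/drop with the Nat quotients is exact for every L ≥ 0.
def pvMask (context : String) : List String :=
  let cs := context.toList.map (fun c => c.toString)
  let L := cs.length
  cs.take ((L - 1) / 2) ++ ["*"] ++ cs.drop ((L + 1) / 2)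

def groupContexts_alt (Dictionary : List (String × Int)) (Alphabet : List String) : List (List String × List Int) :=
  let pairs := Dictionary.map (fun kv => (pvMask kv.1, kv.2))
  let keys := PySem.List.dedup (pairs.map Prod.fst)
  keys.map (fun m => (m, pairs.filterMap (fun p => if p.1 = m then some p.2 else none)))

-- ===== PRECONDITION & SPEC =====
def Spec_groupContexts (Dictionary : List (String × Int)) (Alphabet : List String) (out : List (List String × List Int)) : Prop := out = groupContexts_alt Dictionary Alphabet
instance (Dictionary : List (String × Int)) (Alphabet : List String) (out : List (List String × List Int)) : Decidable (Spec_groupContexts Dictionary Alphabet out) := by unfold Spec_groupContexts; infer_instance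

-- ===== CLAIM (what is proved, stated in full; the proofs are below) =====
def Claim_equal_groupContexts : Prop := ∀ (Dictionary : List (String × Int)) (Alphabet : List String), Dom_groupContexts Dictionary Alphabet → Spec_groupContexts Dictionary Alphabet (groupContexts Dictionary Alphabet)

-- ===== LEMMAS AND PROOFS =====

-- the per-key gather is filter-then-project
theorem pv_gather_eq (ps : List (List String × Int)) (m : List String) :
    ps.filterMap (fun p => if p.1 = m then some p.2 else none)
      = (ps.filter (fun p => p.1 == m)).map (fun p => p.2) := by
  induction ps with
  | nil => rfl
  | cons a t ih =>
    by_cases h : a.1 = m <;> simp [h, ih]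

theorem pv_main (ps : List (List String × Int)) :
    (ps.foldl (fun (g : PySem.Dict (List String) (List Int)) p =>
        g.insert p.1 (g.getD p.1 [] ++ [p.2])) PySem.Dict.empty).items
      = (PySem.List.dedup (ps.map Prod.fst)).map
          (fun m => (m, ps.filterMap (fun p => if p.1 = m then some p.2 else none))) := by
  have hmod : (ps.foldl (fun (g : PySem.Dict (List String) (List Int)) p =>
      g.insert p.1 (g.getD p.1 [] ++ [p.2])) PySem.Dict.empty)
      = ps.foldl (fun (g : PySem.Dict (List String) (List Int)) p =>
          g.modify p.1 [] (· ++ [p.2])) PySem.Dict.empty := rfl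
  rw [hmod]
  set g := ps.foldl (fun (g : PySem.Dict (List String) (List Int)) p =>
      g.modify p.1 [] (· ++ [p.2])) PySem.Dict.empty with hg
  have hkeys : g.keys = PySem.List.dedup (ps.map Prod.fst) := by
    rw [hg, PySem.Dict.keys_foldl_modify_key]
    simp [PySem.Set.update_nil_left]
  have hnd : g.keys.Nodup := by rw [hkeys]; exact PySem.List.nodup_dedup _
  rw [PySem.Dict.items_eq_map_keys g hnd [], hkeys]
  refine List.map_congr_left (fun m _ => ?_)
  have hget : g.getD m [] = (ps.filter (fun p => p.1 == m)).map (fun p => p.2) := by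
    rw [hg, PySem.Dict.getD_foldl_modify_append]
    simp
  rw [hget, pv_gather_eq]

-- ===== VERDICT (by name: the statement is the Claim_ definition above) =====
theorem groupContexts_spec : Claim_equal_groupContexts := by
  intro Dictionary Alphabet _
  show (List.foldl (fun (g : PySem.Dict (List String) (List Int)) kv =>
          g.insert (pvMask kv.1) (g.getD (pvMask kv.1) [] ++ [kv.2]))
        PySem.Dict.empty Dictionary).items
      = (PySem.List.dedup ((Dictionary.map (fun kv => (pvMask kv.1, kv.2))).map Prod.fst)).map
          (fun m => (m, (Dictionary.map (fun kv => (pvMask kv.1, kv.2))).filterMap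
            (fun p => if p.1 = m then some p.2 else none)))
  rw [← List.foldl_map (f := fun kv : String × Int => (pvMask kv.1, kv.2))
      (g := fun (g : PySem.Dict (List String) (List Int)) p =>
        g.insert p.1 (g.getD p.1 [] ++ [p.2]))]
  exact pv_main _
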